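-- pv_equiv track=rewrite | github.com/wju98/flamecalculator | main.py | getMultiValuesFromLine
-- ===== SOURCE A (Python) =====
-- def getMultiValuesFromLine(line):
--     value = 0
--     listtostore = []
--     for i in range(len(line)):
--         if line[i].isdigit():
--             value *= 10
--             value += int(line[i])
--         if line[i] == 'l':
--             value *= 10
--             value += 1
--         if line[i] == 'o' or line[i] == 'O':
--             value *= 10
--         if line[i] == 's' or line[i] == 'S':
--             value *= 10
--             value += 5
--         if value and ((not line[i].isdigit() and (
--                 line[i] != 'l' or line[i] != 'o' or line[i] != 'O' or line[i] != 's' or line[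
--             i] != 'S')) or i + 1 == len(line)):
--             listtostore.append(threedigitslong(value))
--             value = 0
--     return listtostore
--
-- def threedigitslong(number):
--     if number > 999:
--         return threedigitslong(number // 10)
--     return number
-- ===== SOURCE B (Python) =====
-- SPECIAL = {'l': 1, 'o': 0, 'O': 0, 's': 5, 'S': 5}
--
-- def truncate3(number):
--     while number > 999:
--         number //= 10
--     return number
--
-- def getMultiValuesFromLine(line):
--     out = []
--     i, n = 0, len(line)
--     while i < n:
--         c = line[i]
--         if c in SPECIAL:
--             value = SPECIAL[c]
--             i += 1
--         elif c.isdigit():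
--             j = i + 1
--             while j < n and line[j].isdigit():
--                 j += 1
--             value = 0
--             for ch in line[i:j]:
--                 value = value * 10 + (ord(ch) - 48)
--             if j < n and line[j] in SPECIAL:
--                 value = value * 10 + SPECIAL[line[j]]
--                 j += 1
--             i = j
--         else:
--             i += 1
--             continue
--         if value:
--             out.append(truncate3(value))
--     return out
-- ===== Notes on version B (the rewrite author's own statement) =====
-- stated objective: simpler
-- what changed: A's single-pass per-character state machine with an inline (always-true) flush predicate is replaced by an explicit tokenizer: grab a special char, or a whole digit run with an optional special suffix, convert each token to its value and truncate; the value accumulator threaded through every character and A's convoluted flush condition disappear.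
import Mathlib
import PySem

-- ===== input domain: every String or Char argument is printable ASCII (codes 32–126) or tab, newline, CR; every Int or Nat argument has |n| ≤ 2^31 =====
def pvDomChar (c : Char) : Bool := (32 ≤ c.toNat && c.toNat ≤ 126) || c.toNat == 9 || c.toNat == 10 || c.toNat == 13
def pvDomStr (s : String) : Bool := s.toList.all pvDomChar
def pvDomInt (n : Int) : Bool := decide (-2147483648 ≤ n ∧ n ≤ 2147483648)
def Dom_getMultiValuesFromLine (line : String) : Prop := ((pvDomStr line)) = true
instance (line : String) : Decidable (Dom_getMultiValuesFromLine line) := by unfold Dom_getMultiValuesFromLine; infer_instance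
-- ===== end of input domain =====

-- B re-implements A's inline per-character state machine as an explicit tokenizer (special char,
-- or digit run with optional special suffix) followed by per-token conversion; objective: simpler. Exact equivalence.

-- ===== PORT A =====

-- threedigitslong: recursive leading-3-digit truncation, as in A
def threedigitslong (number : Int) : Int :=
  if 999 < number then threedigitslong (PySem.Int.floordiv number 10) else number
termination_by number.toNat
decreasing_by
  rw [PySem.Int.floordiv_eq_ediv_of_pos (by norm_num)]
  omega

-- the for-loop of A, one character per step; `rest = []` is A's `i + 1 == len(line)`;
-- `int(line[i])` on a digit character is exactly `c.toNat - 48`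
def aLoop (value : Int) (listtostore : List Int) : List Char → List Int
  | [] => listtostore
  | c :: rest =>
    let value := if PySem.Chars.isdigit c then value * 10 + ((c.toNat : Int) - 48) else value
    let value := if c = 'l' then value * 10 + 1 else value
    let value := if c = 'o' ∨ c = 'O' then value * 10 else value
    let value := if c = 's' ∨ c = 'S' then value * 10 + 5 else value
    if value ≠ 0 ∧ ((¬ PySem.Chars.isdigit c ∧
        (c ≠ 'l' ∨ c ≠ 'o' ∨ c ≠ 'O' ∨ c ≠ 's' ∨ c ≠ 'S')) ∨ rest = []) then
      aLoop 0 (listtostore ++ [threedigitslong value]) rest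
    else
      aLoop value listtostore rest

def getMultiValuesFromLine (line : String) : List Int := aLoop 0 [] line.toList

-- ===== PORT B =====

-- the SPECIAL dict of Source B as a lookup function
def bSpec? (c : Char) : Option Int :=
  if c = 'l' then some 1
  else if c = 'o' then some 0
  else if c = 'O' then some 0
  else if c = 's' then some 5
  else if c = 'S' then some 5
  else none

-- truncate3: while number > 999: number //= 10
def bTrunc (number : Int) : Int :=
  if 999 < number then bTrunc (PySem.Int.floordiv number 10) else number
termination_by number.toNat
decreasing_by
  rw [PySem.Int.floordiv_eq_ediv_of_pos (by norm_num)]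
  omega

-- `for ch in line[i:j]: value = value * 10 + (ord(ch) - 48)`
def bDigitsVal (ds : List Char) : Int :=
  ds.foldl (fun v ch => v * 10 + ((ch.toNat : Int) - 48)) 0

-- the outer while-loop of Source B; the inner digit-scanning while is takeWhile/dropWhile
def bGo : List Char → List Int
  | [] => []
  | c :: rest =>
    match bSpec? c with
    | some k => (if k ≠ 0 then [bTrunc k] else []) ++ bGo rest
    | none =>
      if PySem.Chars.isdigit c then
        let value := bDigitsVal (c :: List.takeWhile PySem.Chars.isdigit rest)
        let rest2 := List.dropWhile PySem.Chars.isdigit rest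
        if rest2.isEmpty then
          if value ≠ 0 then [bTrunc value] else []
        else
          -- rest2.headD ' ' is Source B's line[j]; the default is never read (rest2 ≠ [] here)
          match bSpec? (rest2.headD ' ') with
          | some k =>
            (if value * 10 + k ≠ 0 then [bTrunc (value * 10 + k)] else []) ++ bGo rest2.tail
          | none => (if value ≠ 0 then [bTrunc value] else []) ++ bGo rest2
      else bGo rest
termination_by cs => cs.length
decreasing_by
  all_goals
    (have h := List.length_dropWhile_le (p := PySem.Chars.isdigit) (l := rest);
     simp at h ⊢ <;> omega)

def getMultiValuesFromLine_alt (line : String) : List Int := bGo line.toList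

-- ===== PRECONDITION & SPEC =====
def Spec_getMultiValuesFromLine (line : String) (out : List Int) : Prop := out = getMultiValuesFromLine_alt line
instance (line : String) (out : List Int) : Decidable (Spec_getMultiValuesFromLine line out) := by unfold Spec_getMultiValuesFromLine; infer_instance

-- ===== CLAIM (what is proved, stated in full; the proofs are below) =====
def Claim_equal_getMultiValuesFromLine : Prop := ∀ (line : String), Dom_getMultiValuesFromLine line → Spec_getMultiValuesFromLine line (getMultiValuesFromLine line)

-- ===== LEMMAS AND PROOFS =====

theorem bTrunc_eq (n : Int) : bTrunc n = threedigitslong n := by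
  fun_induction bTrunc n with
  | case1 n h ih => rw [threedigitslong, if_pos h, ih]
  | case2 n h => rw [threedigitslong, if_neg h]

theorem spec_none_ne {c : Char} (hs : bSpec? c = none) :
    c ≠ 'l' ∧ c ≠ 'o' ∧ c ≠ 'O' ∧ c ≠ 's' ∧ c ≠ 'S' := by
  unfold bSpec? at hs
  split_ifs at hs with h1 h2 h3 h4 h5
  exact ⟨h1, h2, h3, h4, h5⟩

theorem spec_some_not_digit {c : Char} {k : Int} (hs : bSpec? c = some k) :
    PySem.Chars.isdigit c = false := by
  unfold bSpec? at hs
  split_ifs at hs <;> subst_vars <;> rfl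

theorem isdigit_spec_none {c : Char} (hd : PySem.Chars.isdigit c = true) :
    bSpec? c = none := by
  unfold bSpec?
  split_ifs <;> subst_vars <;> first | rfl | (revert hd; decide)

theorem aLoop_ord {c : Char} (hd : PySem.Chars.isdigit c = false) (hs : bSpec? c = none)
    (v : Int) (acc : List Int) (rest : List Char) :
    aLoop v acc (c :: rest) =
      if v = 0 then aLoop 0 acc rest else aLoop 0 (acc ++ [threedigitslong v]) rest := by
  obtain ⟨h1, h2, h3, h4, h5⟩ := spec_none_ne hs
  by_cases hv : v = 0 <;>
    simp [aLoop, hd, h1, h2, h3, h4, h5, hv]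

theorem aLoop_spec {c : Char} {k : Int} (hs : bSpec? c = some k)
    (v : Int) (acc : List Int) (rest : List Char) :
    aLoop v acc (c :: rest) =
      if v * 10 + k = 0 then aLoop 0 acc rest
      else aLoop 0 (acc ++ [threedigitslong (v * 10 + k)]) rest := by
  have h5 : (c = 'l' ∧ k = 1) ∨ (c = 'o' ∧ k = 0) ∨ (c = 'O' ∧ k = 0) ∨
      (c = 's' ∧ k = 5) ∨ (c = 'S' ∧ k = 5) := by
    unfold bSpec? at hs
    split_ifs at hs <;> simp_all
  have hdl := spec_some_not_digit hs
  by_cases hz : v * 10 + k = 0 <;>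
    obtain ⟨rfl, rfl⟩ | ⟨rfl, rfl⟩ | ⟨rfl, rfl⟩ | ⟨rfl, rfl⟩ | ⟨rfl, rfl⟩ := h5 <;>
    simp_all [aLoop]

theorem aLoop_digit {c : Char} (hd : PySem.Chars.isdigit c = true)
    (v : Int) (acc : List Int) (rest : List Char) :
    aLoop v acc (c :: rest) =
      if rest = [] then
        (if v * 10 + ((c.toNat : Int) - 48) = 0 then acc
         else acc ++ [threedigitslong (v * 10 + ((c.toNat : Int) - 48))])
      else aLoop (v * 10 + ((c.toNat : Int) - 48)) acc rest := by
  obtain ⟨h1, h2, h3, h4, h5⟩ := spec_none_ne (isdigit_spec_none hd)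
  cases rest with
  | nil =>
    by_cases hz : v * 10 + ((c.toNat : Int) - 48) = 0 <;>
      simp [aLoop, hd, h1, h2, h3, h4, h5, hz]
  | cons d rest' =>
    simp [aLoop, hd, h1, h2, h3, h4, h5]

theorem aLoop_run_mid (ds : List Char) (hall : ∀ x ∈ ds, PySem.Chars.isdigit x = true)
    (rest : List Char) (hne : rest ≠ []) (v : Int) (acc : List Int) :
    aLoop v acc (ds ++ rest) =
      aLoop (ds.foldl (fun a ch => a * 10 + ((ch.toNat : Int) - 48)) v) acc rest := by
  induction ds generalizing v with
  | nil => simp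
  | cons d ds ih =>
    have hd := hall d (List.mem_cons_self ..)
    rw [List.cons_append, aLoop_digit hd,
        if_neg (by simp [hne]), ih (fun x hx => hall x (List.mem_cons_of_mem _ hx))]
    simp

theorem aLoop_run_end (ds : List Char) (hall : ∀ x ∈ ds, PySem.Chars.isdigit x = true)
    (hne : ds ≠ []) (v : Int) (acc : List Int) :
    aLoop v acc ds =
      if ds.foldl (fun a ch => a * 10 + ((ch.toNat : Int) - 48)) v = 0 then acc
      else acc ++ [threedigitslong (ds.foldl (fun a ch => a * 10 + ((ch.toNat : Int) - 48)) v)] := by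
  induction ds generalizing v with
  | nil => cases hne rfl
  | cons d ds ih =>
    have hd := hall d (List.mem_cons_self ..)
    cases ds with
    | nil =>
      rw [aLoop_digit hd, if_pos rfl]
      by_cases hz : v * 10 + ((d.toNat : Int) - 48) = 0 <;> simp [hz]
    | cons e ds' =>
      rw [aLoop_digit hd, if_neg (by simp),
          ih (fun x hx => hall x (List.mem_cons_of_mem _ hx)) (by simp)]
      simp

theorem aLoop_eq_bGo : ∀ (n : Nat) (cs : List Char), cs.length ≤ n →
    ∀ acc, aLoop 0 acc cs = acc ++ bGo cs := by
  intro n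
  induction n with
  | zero =>
    intro cs h acc
    have : cs = [] := List.eq_nil_of_length_eq_zero (Nat.le_zero.mp h)
    subst this; simp [aLoop, bGo]
  | succ n ih =>
    intro cs hlen acc
    match cs with
    | [] => simp [aLoop, bGo]
    | c :: rest =>
      have hrest : rest.length ≤ n := by simpa using Nat.le_of_succ_le_succ (by simpa using hlen)
      cases hbs : bSpec? c with
      | some k =>
        rw [aLoop_spec hbs, bGo]
        simp only [hbs]
        by_cases hk : k = 0 <;>
          simp [hk, ih rest hrest, bTrunc_eq, List.append_assoc]
      | none =>
        cases hd : PySem.Chars.isdigit c with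
        | false =>
          rw [aLoop_ord hd hbs, if_pos rfl]
          have := ih rest hrest acc
          simpa [bGo, hbs, hd] using this
        | true =>
          have hsplit : c :: rest =
              (c :: rest.takeWhile PySem.Chars.isdigit) ++ rest.dropWhile PySem.Chars.isdigit := by
            simp [List.takeWhile_append_dropWhile]
          have hall : ∀ x ∈ c :: rest.takeWhile PySem.Chars.isdigit,
              PySem.Chars.isdigit x = true := by
            intro x hx
            rcases List.mem_cons.mp hx with h | h
            · subst h; exact hd
            · exact List.mem_takeWhile_imp h
          have hdlen := List.length_dropWhile_le (p := PySem.Chars.isdigit) (l := rest)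
          rw [bGo]
          simp only [hbs, hd]
          cases hdw : rest.dropWhile PySem.Chars.isdigit with
          | nil =>
            have hds : rest.takeWhile PySem.Chars.isdigit = rest := by
              conv_rhs => rw [← List.takeWhile_append_dropWhile (p := PySem.Chars.isdigit)
                (l := rest)]
              rw [hdw, List.append_nil]
            rw [hds] at hall
            rw [aLoop_run_end _ hall (by simp)]
            by_cases hz : bDigitsVal (c :: rest) = 0 <;>
              simp [bDigitsVal, hds, bTrunc_eq] at hz ⊢ <;> simp [hz]
          | cons d rest' =>
            have hdn : PySem.Chars.isdigit d = false := by
              have hw : rest.dropWhile PySem.Chars.isdigit ≠ [] := by rw [hdw]; simp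
              have := List.head_dropWhile_not (p := PySem.Chars.isdigit) hw
              simpa [hdw] using this
            have hr' : rest'.length ≤ n := by
              rw [hdw] at hdlen; simp at hdlen; omega
            have hsplit2 : (c :: rest.takeWhile PySem.Chars.isdigit) ++ (d :: rest') =
                c :: rest := by
              rw [List.cons_append, ← hdw, List.takeWhile_append_dropWhile]
            conv_lhs => rw [← hsplit2]
            rw [aLoop_run_mid _ hall _ (by simp)]
            cases hbs2 : bSpec? d with
            | some k =>
              rw [aLoop_spec hbs2]
              by_cases hz : (c :: rest.takeWhile PySem.Chars.isdigit).foldl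
                  (fun a ch => a * 10 + ((ch.toNat : Int) - 48)) 0 * 10 + k = 0 <;>
                simp [bDigitsVal, hbs2, bTrunc_eq] at hz ⊢ <;>
                simp [hz, ih rest' hr', List.append_assoc]
            | none =>
              rw [aLoop_ord hdn hbs2]
              have hgd : bGo (d :: rest') = bGo rest' := by
                rw [bGo]; simp [hbs2, hdn]
              by_cases hz : (c :: rest.takeWhile PySem.Chars.isdigit).foldl
                  (fun a ch => a * 10 + ((ch.toNat : Int) - 48)) 0 = 0 <;>
                simp [bDigitsVal, hbs2, bTrunc_eq] at hz ⊢ <;>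
                simp [hz, hgd, ih rest' hr', List.append_assoc]

-- ===== VERDICT (by name: the statement is the Claim_ definition above) =====
theorem getMultiValuesFromLine_spec : Claim_equal_getMultiValuesFromLine := by
  intro line _
  unfold Spec_getMultiValuesFromLine getMultiValuesFromLine getMultiValuesFromLine_alt
  simpa using aLoop_eq_bGo line.toList.length line.toList le_rfl []
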